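-- pv_equiv track=rewrite | github.com/siu98/BaekjoonCoding | 프로그래머스/1/82612. 부족한 금액 계산하기/부족한 금액 계산하기.py | solution
-- ===== SOURCE A (Python) =====
-- def solution(price, money, count):
--     NewPrice = 0
--     for i in range(count):
--         NewPrice += price*(i+1)
--
--     if money - NewPrice >= 0:
--         return 0
--     else:
--         return abs(money - NewPrice)
-- ===== SOURCE B (Python) =====
-- def solution(price, money, count):
--     n = count if count > 0 else 0
--     total = price * n * (n + 1) // 2
--     shortfall = total - money
--     return shortfall if shortfall > 0 else 0
-- ===== Notes on version B (the rewrite author's own statement) =====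
-- stated objective: faster
-- what changed: Replaces the O(count) accumulation loop with the closed-form arithmetic-series formula price*count*(count+1)//2 and a max-with-zero.
import Mathlib
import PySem

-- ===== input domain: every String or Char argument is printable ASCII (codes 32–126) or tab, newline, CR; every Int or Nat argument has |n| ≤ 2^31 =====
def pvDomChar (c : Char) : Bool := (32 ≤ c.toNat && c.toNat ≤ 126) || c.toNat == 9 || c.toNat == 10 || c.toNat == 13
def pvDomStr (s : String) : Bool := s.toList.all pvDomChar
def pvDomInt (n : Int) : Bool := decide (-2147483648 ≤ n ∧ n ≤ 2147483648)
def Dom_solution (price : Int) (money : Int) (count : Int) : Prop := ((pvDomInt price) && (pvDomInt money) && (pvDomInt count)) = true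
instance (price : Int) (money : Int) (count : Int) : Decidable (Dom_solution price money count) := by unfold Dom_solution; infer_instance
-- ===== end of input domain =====

-- B replaces A's O(count) accumulation loop with the closed-form series price*count*(count+1)//2 (O(1)).

-- ===== PORT A =====
def solution (price : Int) (money : Int) (count : Int) : Int :=
  let newPrice := (PySem.List.pyRange 0 count 1).foldl (fun acc i => acc + price * (i + 1)) 0
  if money - newPrice ≥ 0 then 0 else |money - newPrice|

-- ===== PORT B =====
def solution_alt (price : Int) (money : Int) (count : Int) : Int :=
  let n := if count > 0 then count else 0
  let total := PySem.Int.floordiv (price * n * (n + 1)) 2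
  let shortfall := total - money
  if shortfall > 0 then shortfall else 0

-- ===== PRECONDITION & SPEC =====
def Spec_solution (price : Int) (money : Int) (count : Int) (out : Int) : Prop := out = solution_alt price money count
instance (price : Int) (money : Int) (count : Int) (out : Int) : Decidable (Spec_solution price money count out) := by unfold Spec_solution; infer_instance

-- ===== CLAIM (what is proved, stated in full; the proofs are below) =====
def Claim_equal_solution : Prop := ∀ (price : Int) (money : Int) (count : Int), Dom_solution price money count → Spec_solution price money count (solution price money count)

-- ===== LEMMAS AND PROOFS =====

-- The loop sum doubled is price*m*(m+1), for m iterations.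
theorem pv_sum_double (price : Int) (m : Nat) :
    2 * (List.foldl (fun (acc : Int) (k : Nat) => acc + price * ((k : Int) + 1)) 0 (List.range m)) = price * m * (m + 1) := by
  induction m with
  | zero => simp
  | succ m ih =>
    rw [List.range_succ, List.foldl_append]
    simp only [List.foldl_cons, List.foldl_nil]
    push_cast
    push_cast at ih
    linarith [ih]

theorem pv_loop_closed (price : Int) (m : Nat) :
    List.foldl (fun (acc : Int) (k : Nat) => acc + price * ((k : Int) + 1)) 0 (List.range m) =
      PySem.Int.floordiv (price * m * (m + 1)) 2 := by
  rw [← pv_sum_double price m]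
  simp [PySem.Int.floordiv]

-- ===== VERDICT (by name: the statement is the Claim_ definition above) =====
theorem solution_spec : Claim_equal_solution := by
  intro price money count _
  unfold Spec_solution solution solution_alt
  rw [PySem.List.pyRange_one]
  simp only [zero_add, List.foldl_map]
  rw [pv_loop_closed]
  have hn : ((count - 0).toNat : Int) = if count > 0 then count else 0 := by
    split <;> omega
  rw [hn]
  set S := PySem.Int.floordiv (price * (if count > 0 then count else 0) * ((if count > 0 then count else 0) + 1)) 2 with hS
  by_cases h : money - S ≥ 0
  · simp; omega
  · simp
    rw [abs_of_neg (by omega : money - S < 0)]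
    omega
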